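-- pv_equiv track=rewrite | github.com/deepxd46/Kudinov | lab3/zad2.py | vostanovlenie
-- ===== SOURCE A (Python) =====
-- def vostanovlenie(verx_trey, N):
--     matrix = [[0] * N for _ in range(N)]
--
--     index = 0
--
--     for i in range(N):
--         for j in range(i, N):
--             matrix[i][j] = verx_trey[index]
--             matrix[j][i] = verx_trey[index]
--             index += 1
--
--     return matrix
-- ===== SOURCE B (Python) =====
-- def vostanovlenie(verx_trey, N):
--     def at(i, j):
--         if j < i:
--             i, j = j, i
--         return verx_trey[i * N - i * (i - 1) // 2 + (j - i)]
--     return [[at(i, j) for j in range(N)] for i in range(N)]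
-- ===== Notes on version B (the rewrite author's own statement) =====
-- stated objective: alternative
-- what changed: Replaces the fused double loop with a running index counter and two symmetric in-place writes by a pure per-cell comprehension that computes each cell's position in the flattened upper triangle with the closed-form formula i*N - i*(i-1)//2 + (j-i) on (min(i,j), max(i,j)); no mutation and no accumulator.
import Mathlib
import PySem

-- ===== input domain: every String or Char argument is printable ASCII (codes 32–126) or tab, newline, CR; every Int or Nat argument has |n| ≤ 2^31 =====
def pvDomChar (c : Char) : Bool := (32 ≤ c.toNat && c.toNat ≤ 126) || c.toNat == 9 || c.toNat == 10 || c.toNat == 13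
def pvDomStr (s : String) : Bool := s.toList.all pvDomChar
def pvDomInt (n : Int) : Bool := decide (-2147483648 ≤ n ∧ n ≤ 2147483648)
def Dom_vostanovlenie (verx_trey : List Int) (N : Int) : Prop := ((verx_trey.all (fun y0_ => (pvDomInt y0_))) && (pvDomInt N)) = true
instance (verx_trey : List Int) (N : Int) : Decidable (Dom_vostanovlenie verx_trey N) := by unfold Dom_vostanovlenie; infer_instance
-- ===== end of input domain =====

-- B rebuilds the symmetric matrix cell by cell from the closed-form position of
-- (min i j, max i j) in the flattened upper triangle, instead of A's fused double
-- loop with a running index counter and two mirrored in-place writes.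

-- ===== PORT A =====
-- inner-loop body of A: read verx_trey[index], write it at [i][j] and [j][i], bump index
def innerF (verx_trey : List Int) (i : Int) (st : List (List Int) × Int) (j : Int) :
    List (List Int) × Int :=
  let v := PySem.List.pyGetD verx_trey st.2 0
  let m1 := st.1.modify i.toNat (fun row => row.set j.toNat v)
  let m2 := m1.modify j.toNat (fun row => row.set i.toNat v)
  (m2, st.2 + 1)

-- literal port of A: preallocated N×N zero matrix, double loop over a running state
-- (matrix, index); verx_trey[index] read via pyGetD (always in range under Pre_)
def vostanovlenie (verx_trey : List Int) (N : Int) : List (List Int) :=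
  let matrix : List (List Int) := List.replicate N.toNat (List.replicate N.toNat 0)
  let res := (PySem.List.pyRange 0 N 1).foldl
    (fun st i => (PySem.List.pyRange i N 1).foldl (innerF verx_trey i) st)
    (matrix, 0)
  res.1

-- ===== PORT B =====
-- B's helper 'at': order the pair, then index by the closed-form triangle position
def bAt (verx_trey : List Int) (N i j : Int) : Int :=
  let p := if j < i then (j, i) else (i, j)
  PySem.List.pyGetD verx_trey (p.1 * N - PySem.Int.floordiv (p.1 * (p.1 - 1)) 2 + (p.2 - p.1)) 0

def vostanovlenie_alt (verx_trey : List Int) (N : Int) : List (List Int) :=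
  (PySem.List.pyRange 0 N 1).map (fun i =>
    (PySem.List.pyRange 0 N 1).map (fun j => bAt verx_trey N i j))

-- ===== PRECONDITION & SPEC =====
-- Pre_ excludes exactly the inputs where Python A (and Python B alike) raises
-- IndexError: N > 0 with fewer than N*(N+1)/2 elements in verx_trey.
def Pre_vostanovlenie (verx_trey : List Int) (N : Int) : Prop :=
  N ≤ 0 ∨ N * (N + 1) ≤ 2 * (verx_trey.length : Int)
instance (verx_trey : List Int) (N : Int) : Decidable (Pre_vostanovlenie verx_trey N) := by
  unfold Pre_vostanovlenie; infer_instance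

def pvWitness_vostanovlenie : List Int × Int := ([1, 2, 3], 2)

def Spec_vostanovlenie (verx_trey : List Int) (N : Int) (out : List (List Int)) : Prop := out = vostanovlenie_alt verx_trey N
instance (verx_trey : List Int) (N : Int) (out : List (List Int)) : Decidable (Spec_vostanovlenie verx_trey N out) := by unfold Spec_vostanovlenie; infer_instance

-- ===== CLAIM (what is proved, stated in full; the proofs are below) =====
def Claim_equal_vostanovlenie : Prop := ∀ (verx_trey : List Int) (N : Int), Dom_vostanovlenie verx_trey N → Pre_vostanovlenie verx_trey N → Spec_vostanovlenie verx_trey N (vostanovlenie verx_trey N)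

-- ===== LEMMAS AND PROOFS =====

-- start of row i in the flattened upper triangle of an n×n matrix
def triStart (n : Nat) : Nat → Nat
  | 0 => 0
  | i + 1 => triStart n i + (n - i)

-- the value both programs place at cell (p, q)
def gCell (verx_trey : List Int) (n p q : Nat) : Int :=
  PySem.List.pyGetD verx_trey ((triStart n (min p q) + (max p q - min p q) : Nat) : Int) 0

-- the matrix of A after finishing rows < a and, in row a, columns < k
def Minner (verx_trey : List Int) (n a k : Nat) : List (List Int) :=
  (List.range n).map (fun p => (List.range n).map (fun q =>
    if min p q < a ∨ (min p q = a ∧ max p q < k) then gCell verx_trey n p q else 0))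

lemma gCell_eq (v : List Int) (n p q p' q' : Nat) (h1 : min p q = min p' q')
    (h2 : max p q = max p' q') : gCell v n p q = gCell v n p' q' := by
  unfold gCell
  rw [h1, h2]

lemma triStart_closed (n i : Nat) (h : i ≤ n) :
    2 * (triStart n i : Int) = 2 * i * n - i * (i - 1) := by
  induction i with
  | zero => simp [triStart]
  | succ i ih =>
    have hi : i ≤ n := Nat.le_of_succ_le h
    have H := ih hi
    have hsub : ((n - i : Nat) : Int) = (n : Int) - i := by omega
    simp only [triStart]
    push_cast [hsub]
    linear_combination H

lemma bAt_eq_g (v : List Int) (n p q : Nat) (hp : p ≤ n) (_hq : q ≤ n) :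
    bAt v (n : Int) (p : Int) (q : Int) = gCell v n p q := by
  unfold bAt gCell
  set m := min p q with hm
  set M := max p q with hM
  have hmn : m ≤ n := le_trans (Nat.min_le_left _ _) hp
  have hmM : m ≤ M := by omega
  have hT : 2 * (triStart n m : Int) = 2 * ((m : Int) * n) - (m : Int) * ((m : Int) - 1) := by
    linear_combination triStart_closed n m hmn
  have hidx : ∀ (a b : Nat), a = m → b = M →
      (a : Int) * n - PySem.Int.floordiv ((a : Int) * ((a : Int) - 1)) 2 + ((b : Int) - a)
        = ((triStart n m + (M - m) : Nat) : Int) := by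
    intro a b ha hb
    subst ha hb
    rw [PySem.Int.floordiv_eq_ediv_of_pos (by omega)]
    generalize hx : (m : Int) * n = x at hT ⊢
    generalize hy : (m : Int) * ((m : Int) - 1) = y at hT ⊢
    omega
  by_cases hlt : (q : Int) < (p : Int)
  · have h1 : min p q = q := by omega
    have h2 : max p q = p := by omega
    simp only [if_pos hlt]
    rw [hidx q p (by omega) (by omega)]
  · have h1 : min p q = p := by omega
    have h2 : max p q = q := by omega
    simp only [if_neg hlt]
    rw [hidx p q (by omega) (by omega)]

lemma Minner_congr (v : List Int) (n a k a' k' : Nat)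
    (h : ∀ p q, p < n → q < n →
      ((min p q < a ∨ (min p q = a ∧ max p q < k)) ↔ (min p q < a' ∨ (min p q = a' ∧ max p q < k')))) :
    Minner v n a k = Minner v n a' k' := by
  unfold Minner
  apply List.map_congr_left
  intro p hp
  apply List.map_congr_left
  intro q hq
  rw [List.mem_range] at hp hq
  exact if_congr (h p q hp hq) rfl rfl

-- option-level index of a mapped range, total in the index
lemma mapRange_get {α : Type} (n p : Nat) (f : Nat → α) :
    ((List.range n).map f)[p]? = if p < n then some (f p) else none := by
  by_cases h : p < n
  · rw [List.getElem?_map, List.getElem?_range h, if_pos h]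
    rfl
  · rw [if_neg h, List.getElem?_eq_none]
    simp
    omega

-- rewriting set/modify on a mapped range as a pointwise function update
lemma set_mapRange {α : Type} (n i : Nat) (x : α) (f : Nat → α) :
    ((List.range n).map f).set i x
      = (List.range n).map (fun q => if q = i ∧ i < n then x else f q) := by
  apply List.ext_getElem?
  intro q
  rw [List.getElem?_set]
  simp only [List.length_map, List.length_range, mapRange_get]
  split_ifs <;> first | rfl | (exfalso; omega)

lemma modify_mapRange {α : Type} (n i : Nat) (g : α → α) (f : Nat → α) :
    ((List.range n).map f).modify i g
      = (List.range n).map (fun p => if p = i then g (f p) else f p) := by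
  apply List.ext_getElem?
  intro q
  rw [List.getElem?_modify]
  simp only [mapRange_get]
  by_cases hq : q < n
  · rw [if_pos hq, if_pos hq]
    simp only [Option.map_eq_map, Option.map_some]
    split_ifs <;> first | rfl | (exfalso; omega)
  · rw [if_neg hq, if_neg hq]
    rfl

-- one inner step: the two mirrored writes turn Minner a j into Minner a (j+1)
lemma Minner_step (v : List Int) (n a j : Nat) (haj : a ≤ j) (hj : j < n) :
    ((Minner v n a j).modify a (fun row => row.set j (gCell v n a j))).modify j
        (fun row => row.set a (gCell v n a j)) = Minner v n a (j + 1) := by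
  unfold Minner
  rw [modify_mapRange, modify_mapRange]
  simp only [apply_ite (fun (l : List Int) => l.set a (gCell v n a j)), set_mapRange]
  apply List.map_congr_left
  intro p hp
  rw [List.mem_range] at hp
  split_ifs with h1 h2 h3 <;>
    · apply List.map_congr_left
      intro q hq
      rw [List.mem_range] at hq
      rcases Nat.le_total p q with hpq | hpq <;>
        [rw [Nat.min_eq_left hpq, Nat.max_eq_right hpq];
         rw [Nat.min_eq_right hpq, Nat.max_eq_left hpq]] <;>
        split_ifs <;>
        first
          | rfl
          | trivial
          | (exfalso; omega)
          | (apply gCell_eq <;> omega)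

lemma inner_spec (v : List Int) (n a : Nat) :
    ∀ d j, a ≤ j → j + d = n →
    (PySem.List.pyRange (j : Int) (n : Int) 1).foldl (innerF v (a : Int))
        (Minner v n a j, ((triStart n a + (j - a) : Nat) : Int))
      = (Minner v n a n, ((triStart n a + (n - a) : Nat) : Int)) := by
  intro d
  induction d with
  | zero =>
    intro j haj hj
    have : j = n := by omega
    subst this
    rw [PySem.List.pyRange_one_eq_nil (le_refl _)]
    rfl
  | succ d ih =>
    intro j haj hj
    have hjn : j < n := by omega
    rw [PySem.List.pyRange_one_cons (by exact_mod_cast hjn)]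
    rw [List.foldl_cons]
    have hstep : innerF v (a : Int) (Minner v n a j, ((triStart n a + (j - a) : Nat) : Int)) (j : Int)
        = (Minner v n a (j + 1), ((triStart n a + (j + 1 - a) : Nat) : Int)) := by
      unfold innerF
      simp only [Int.toNat_natCast]
      have hval : PySem.List.pyGetD v ((triStart n a + (j - a) : Nat) : Int) 0 = gCell v n a j := by
        unfold gCell
        rw [Nat.min_eq_left haj, Nat.max_eq_right haj]
      rw [hval, Minner_step v n a j haj hjn]
      have hidx2 : ((triStart n a + (j - a) : Nat) : Int) + 1
          = ((triStart n a + (j + 1 - a) : Nat) : Int) := by push_cast; omega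
      rw [hidx2]
    rw [hstep]
    have : ((j : Int) + 1) = ((j + 1 : Nat) : Int) := by push_cast; ring
    rw [this]
    exact ih (j + 1) (by omega) (by omega)

lemma Minner_zero (v : List Int) (n : Nat) :
    Minner v n 0 0 = List.replicate n (List.replicate n (0 : Int)) := by
  simp [Minner]

lemma outer_spec (v : List Int) (n : Nat) :
    ∀ d i, i + d = n →
    (PySem.List.pyRange (i : Int) (n : Int) 1).foldl
        (fun st x => (PySem.List.pyRange x (n : Int) 1).foldl (innerF v x) st)
        (Minner v n i i, ((triStart n i : Nat) : Int))
      = (Minner v n n n, ((triStart n n : Nat) : Int)) := by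
  intro d
  induction d with
  | zero =>
    intro i hi
    have : i = n := by omega
    subst this
    rw [PySem.List.pyRange_one_eq_nil (le_refl _)]
    rfl
  | succ d ih =>
    intro i hi
    have hin : i < n := by omega
    rw [PySem.List.pyRange_one_cons (by exact_mod_cast hin), List.foldl_cons]
    have h1 : (PySem.List.pyRange (i : Int) (n : Int) 1).foldl (innerF v (i : Int))
        (Minner v n i i, ((triStart n i : Nat) : Int))
      = (Minner v n i n, ((triStart n i + (n - i) : Nat) : Int)) := by
      have := inner_spec v n i (n - i) i (le_refl _) (by omega)
      simpa using this
    rw [h1]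
    have h2 : Minner v n i n = Minner v n (i + 1) (i + 1) := by
      apply Minner_congr
      intro p q hp hq
      omega
    have h3 : (triStart n i + (n - i) : Nat) = triStart n (i + 1) := rfl
    rw [h2, h3]
    exact ih (i + 1) (by omega)

lemma Minner_full (v : List Int) (n : Nat) :
    Minner v n n n = (List.range n).map (fun p => (List.range n).map (fun q => gCell v n p q)) := by
  unfold Minner
  apply List.map_congr_left
  intro p hp
  apply List.map_congr_left
  intro q hq
  rw [List.mem_range] at hp hq
  rw [if_pos (by omega)]

lemma vost_eq (v : List Int) (n : Nat) :
    vostanovlenie v (n : Int) =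
      (List.range n).map (fun p => (List.range n).map (fun q => gCell v n p q)) := by
  have H := outer_spec v n n 0 (by omega)
  simp only [Nat.cast_zero] at H
  have h0 : ((triStart n 0 : Nat) : Int) = 0 := by simp [triStart]
  rw [h0, Minner_zero] at H
  have H1 := congrArg Prod.fst H
  unfold vostanovlenie
  simp only [Int.toNat_natCast]
  rw [Minner_full] at H1
  exact H1

lemma vost_alt_eq (v : List Int) (n : Nat) :
    vostanovlenie_alt v (n : Int) =
      (List.range n).map (fun p => (List.range n).map (fun q => gCell v n p q)) := by
  unfold vostanovlenie_alt
  rw [PySem.List.pyRange_one]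
  simp only [sub_zero, Int.toNat_natCast, List.map_map]
  apply List.map_congr_left
  intro p hp
  rw [List.mem_range] at hp
  simp only [Function.comp, zero_add]
  apply List.map_congr_left
  intro q hq
  rw [List.mem_range] at hq
  exact bAt_eq_g v n p q (by omega) (by omega)

-- ===== VERDICT (by name: the statement is the Claim_ definition above) =====
theorem vostanovlenie_spec : Claim_equal_vostanovlenie := by
  intro verx_trey N _ _
  unfold Spec_vostanovlenie
  by_cases hN : 0 ≤ N
  · obtain ⟨n, rfl⟩ : ∃ n : Nat, N = (n : Int) := ⟨N.toNat, by omega⟩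
    rw [vost_eq verx_trey n, vost_alt_eq verx_trey n]
  · have h1 : PySem.List.pyRange 0 N 1 = [] := PySem.List.pyRange_one_eq_nil (by omega)
    have h2 : N.toNat = 0 := by omega
    simp [vostanovlenie, vostanovlenie_alt, h1, h2]
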